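-- pv_equiv track=rewrite | github.com/Aneureka/Life_in_NJU | njuseoj/problems/sort_shell.py | shell_sub_sort
-- ===== SOURCE A (Python) =====
-- def shell_sub_sort(nums, gap):
--     n = len(nums)
--     for i in range(gap):
--         for j in range(i, n, gap):
--             k = j
--             while k > i and nums[k] < nums[k-gap]:
--                 nums[k], nums[k-gap] = nums[k-gap], nums[k]
--                 k -= gap
--     return nums
-- ===== SOURCE B (Python) =====
-- def shell_sub_sort(nums, gap):
--     for i in range(gap):
--         nums[i::gap] = sorted(nums[i::gap])
--     return nums
-- ===== Notes on version B (the rewrite author's own statement) =====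
-- stated objective: idiomatic
-- what changed: B replaces the hand-written per-subgroup insertion sort with swaps by slicing out each gap-strided subgroup, sorting it with the built-in sorted(), and splicing it back via extended-slice assignment; both mutate nums in place and return it.
import Mathlib
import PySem

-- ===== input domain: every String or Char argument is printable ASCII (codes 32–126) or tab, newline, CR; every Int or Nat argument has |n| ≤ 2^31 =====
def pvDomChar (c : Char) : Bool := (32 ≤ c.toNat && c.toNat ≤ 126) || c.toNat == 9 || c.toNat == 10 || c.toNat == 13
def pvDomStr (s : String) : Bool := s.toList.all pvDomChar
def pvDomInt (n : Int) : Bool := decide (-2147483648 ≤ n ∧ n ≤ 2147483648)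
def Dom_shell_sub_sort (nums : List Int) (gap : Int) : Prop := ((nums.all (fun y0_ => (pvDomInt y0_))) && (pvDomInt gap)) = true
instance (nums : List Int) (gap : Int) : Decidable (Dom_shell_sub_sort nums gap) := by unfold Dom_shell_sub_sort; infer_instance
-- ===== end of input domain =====

-- B sorts each gap-strided subgroup with the built-in sorted() and splices it back, instead of
-- A's hand-written per-subgroup insertion sort; both mutate the Python list in place and return it
-- (the final list state is identical), the equivalence proved here is about the returned value.

-- ===== PORT A =====

/-- `range(i, n, g)`: hand port of Python `range` with a positive step (exact for `g > 0`;
    for `g = 0` it returns `[]`, which is only reached when the loops below never run). -/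
def pvStride (i n g : Nat) : List Nat :=
  if _h : 0 < g ∧ i < n then i :: pvStride (i + g) n g else []
  termination_by n - i
  decreasing_by omega

/-- Python's simultaneous swap `xs[a], xs[b] = xs[b], xs[a]` (both reads on the old list). -/
def pvSwap (xs : List Int) (a b : Nat) : List Int :=
  (xs.set a (xs.getD b 0)).set b (xs.getD a 0)

/-- the `while k > i and nums[k] < nums[k-gap]` loop of A; the `0 < g` conjunct is a totality
    guard only (every call site has `g = gap ≥ 1`, where it is true). -/
def aWhile (g i : Nat) (xs : List Int) (k : Nat) : List Int :=
  if _h : 0 < g ∧ i < k ∧ xs.getD k 0 < xs.getD (k - g) 0 then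
    aWhile g i (pvSwap xs k (k - g)) (k - g)
  else xs
  termination_by k
  decreasing_by omega

/-- the body of A's `for i in range(gap)` loop: `for j in range(i, n, gap): k = j; while …`. -/
def aPass (g n : Nat) (xs : List Int) (i : Nat) : List Int :=
  (pvStride i n g).foldl (fun ys j => aWhile g i ys j) xs

def shell_sub_sort (nums : List Int) (gap : Int) : List Int :=
  (List.range gap.toNat).foldl (aPass gap.toNat nums.length) nums

-- ===== PORT B =====

/-- the slice `nums[i::g]` for `g ≥ 1`: gather the values at positions `i, i+g, i+2g, …` (hand
    port of an extended slice read; exact there). -/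
def pvSub (g : Nat) (xs : List Int) (i : Nat) : List Int :=
  (pvStride i xs.length g).map (fun p => xs.getD p 0)

/-- extended-slice assignment `nums[i::g] = vs`: write the values of `vs` at positions
    `i, i+g, i+2g, …` (hand port; exact when `vs` has the slice's length, which Python requires). -/
def pvScatter (xs : List Int) (i g : Nat) (vs : List Int) : List Int :=
  match vs with
  | [] => xs
  | v :: vs => pvScatter (xs.set i v) (i + g) g vs

def shell_sub_sort_alt (nums : List Int) (gap : Int) : List Int :=
  (List.range gap.toNat).foldl
    (fun xs i => pvScatter xs i gap.toNat (PySem.List.sorted (pvSub gap.toNat xs i) (fun x => x) false))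
    nums

-- ===== PRECONDITION & SPEC =====
def Spec_shell_sub_sort (nums : List Int) (gap : Int) (out : List Int) : Prop := out = shell_sub_sort_alt nums gap
instance (nums : List Int) (gap : Int) (out : List Int) : Decidable (Spec_shell_sub_sort nums gap out) := by unfold Spec_shell_sub_sort; infer_instance

-- ===== CLAIM (what is proved, stated in full; the proofs are below) =====
def Claim_equal_shell_sub_sort : Prop := ∀ (nums : List Int) (gap : Int), Dom_shell_sub_sort nums gap → Spec_shell_sub_sort nums gap (shell_sub_sort nums gap)

-- ===== LEMMAS AND PROOFS =====

-- ---- getD / set basics ----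

theorem pv_getD_set_ne (xs : List Int) (p q : Nat) (v : Int) (h : p ≠ q) :
    (xs.set p v).getD q 0 = xs.getD q 0 := by
  simp [List.getD_eq_getElem?_getD, List.getElem?_set_ne h]

theorem pv_getD_set_self (xs : List Int) (p : Nat) (v : Int) (hp : p < xs.length) :
    (xs.set p v).getD p 0 = v := by
  rw [List.getD_eq_getElem _ _ (by simpa using hp)]
  simp

-- ---- pvStride facts ----

theorem pvStride_getElem? (g n : Nat) (hg : 0 < g) :
    ∀ (d i t : Nat), n - i = d →
      (pvStride i n g)[t]? = if i + t * g < n then some (i + t * g) else none := by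
  intro d
  induction d using Nat.strong_induction_on with
  | _ d ih =>
    intro i t hd
    by_cases hin : i < n
    · rw [pvStride, dif_pos ⟨hg, hin⟩]
      cases t with
      | zero => simp [hin]
      | succ s =>
        have h := ih (n - (i + g)) (by omega) (i + g) s rfl
        have harith : i + g + s * g = i + (s + 1) * g := by rw [Nat.succ_mul]; omega
        rw [harith] at h
        simpa using h
    · rw [pvStride, dif_neg (by omega)]
      have : ¬ (i + t * g < n) := by omega
      simp [this]

theorem pvStride_length_iff (g n i t : Nat) (hg : 0 < g) :
    t < (pvStride i n g).length ↔ i + t * g < n := by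
  have h := pvStride_getElem? g n hg (n - i) i t rfl
  constructor
  · intro hl
    by_contra hc
    rw [if_neg hc, List.getElem?_eq_getElem hl] at h
    simp at h
  · intro hc
    by_contra hl
    rw [if_pos hc, List.getElem?_eq_none (by omega)] at h
    simp at h

theorem pvStride_getElem (g n i t : Nat) (hg : 0 < g) (h : t < (pvStride i n g).length) :
    (pvStride i n g)[t] = i + t * g := by
  have h2 := pvStride_getElem? g n hg (n - i) i t rfl
  rw [List.getElem?_eq_getElem h] at h2
  rw [if_pos ((pvStride_length_iff g n i t hg).1 h)] at h2
  exact Option.some.inj h2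

theorem pvStride_eq_map (g n i : Nat) (hg : 0 < g) :
    pvStride i n g = (List.range (pvStride i n g).length).map (fun t => i + t * g) := by
  apply List.ext_getElem (by simp)
  intro t h1 h2
  rw [pvStride_getElem g n i t hg h1]
  simp

-- ---- pvSub basics ----

theorem length_pvSub (g : Nat) (xs : List Int) (i : Nat) :
    (pvSub g xs i).length = (pvStride i xs.length g).length := by
  simp [pvSub]

theorem pvSub_getD (g : Nat) (xs : List Int) (i t : Nat) (hg : 0 < g) :
    (pvSub g xs i).getD t 0 = xs.getD (i + t * g) 0 := by
  by_cases h : t < (pvStride i xs.length g).length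
  · rw [List.getD_eq_getElem _ _ (by simpa [pvSub] using h)]
    simp only [pvSub, List.getElem_map]
    rw [pvStride_getElem g xs.length i t hg h]
  · have h2 : ¬ (i + t * g < xs.length) := by
      rw [← pvStride_length_iff g xs.length i t hg]; exact h
    rw [List.getD_eq_default _ _ (by simpa [pvSub] using Nat.le_of_not_lt h),
        List.getD_eq_default _ _ (by omega)]

theorem pvSub_set (g : Nat) (xs : List Int) (i t : Nat) (v : Int) (hg : 0 < g)
    (ht : i + t * g < xs.length) :
    pvSub g (xs.set (i + t * g) v) i = (pvSub g xs i).set t v := by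
  have hlen : (xs.set (i + t * g) v).length = xs.length := by simp
  apply List.ext_getElem
  · simp [pvSub, hlen]
  intro u h1 h2
  have hu : u < (pvStride i xs.length g).length := by simpa [pvSub, hlen] using h1
  simp only [pvSub, hlen, List.getElem_map, List.getElem_set]
  rw [pvStride_getElem g xs.length i u hg hu]
  by_cases hut : t = u
  · subst hut
    rw [if_pos rfl, pv_getD_set_self _ _ _ ht]
  · rw [if_neg hut, pv_getD_set_ne]
    intro hc
    exact hut (Nat.eq_of_mul_eq_mul_right hg (by omega)).symm

theorem pvSub_cons (g : Nat) (xs : List Int) (i : Nat) (hg : 0 < g) (h : i < xs.length) :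
    pvSub g xs i = xs.getD i 0 :: pvSub g xs (i + g) := by
  unfold pvSub
  rw [pvStride, dif_pos ⟨hg, h⟩]
  simp

theorem pvSub_nil (g : Nat) (xs : List Int) (i : Nat) (h : ¬ (0 < g ∧ i < xs.length)) :
    pvSub g xs i = [] := by
  unfold pvSub
  rw [pvStride, dif_neg h]
  simp

-- ---- pvSwap basics ----

theorem length_pvSwap (xs : List Int) (a b : Nat) : (pvSwap xs a b).length = xs.length := by
  simp [pvSwap]

theorem perm_pvSwap (xs : List Int) (a b : Nat) (ha : a < xs.length) (hb : b < xs.length) :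
    (pvSwap xs a b).Perm xs := by
  by_cases hab : a = b
  · subst hab
    unfold pvSwap
    rw [List.set_set]
    have : xs.getD a 0 = xs[a] := List.getD_eq_getElem _ _ ha
    rw [this, List.set_getElem_self]
  · rw [List.perm_iff_count]
    intro x
    unfold pvSwap
    have hb' : b < (xs.set a (xs.getD b 0)).length := by simpa using hb
    rw [List.count_set hb', List.count_set ha]
    have hsb : (xs.set a (xs.getD b 0))[b] = xs[b] := by
      rw [List.getElem_set, if_neg hab]
    have hga : xs.getD a 0 = xs[a] := List.getD_eq_getElem _ _ ha
    have hgb : xs.getD b 0 = xs[b] := List.getD_eq_getElem _ _ hb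
    rw [hsb, hga, hgb]
    have h1 : (xs[a] == x) = true → 1 ≤ xs.count x := by
      intro h
      rw [List.one_le_count_iff]
      exact (beq_iff_eq.1 h) ▸ List.getElem_mem ha
    have h2 : (xs[b] == x) = true → 1 ≤ xs.count x := by
      intro h
      rw [List.one_le_count_iff]
      exact (beq_iff_eq.1 h) ▸ List.getElem_mem hb
    split_ifs with c1 c2 c3
    · have := h1 c1; have := h2 c2; omega
    · have := h1 c1; omega
    · have := h2 c3; omega
    · omega

theorem pvSwap_getElem (xs : List Int) (a b c : Nat) (ha : a < xs.length) (hb : b < xs.length)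
    (hc : c < xs.length) :
    (pvSwap xs a b)[c]'(by simpa [pvSwap] using hc)
      = if c = b then xs[a] else if c = a then xs[b] else xs[c] := by
  have hga : xs.getD a 0 = xs[a] := List.getD_eq_getElem _ _ ha
  have hgb : xs.getD b 0 = xs[b] := List.getD_eq_getElem _ _ hb
  simp only [pvSwap, List.getElem_set, hga, hgb]
  by_cases h1 : c = b
  · rw [if_pos (by omega), if_pos h1]
  · rw [if_neg (by omega), if_neg h1]
    by_cases h2 : c = a
    · rw [if_pos (by omega), if_pos h2]
    · rw [if_neg (by omega), if_neg h2]

-- ---- pvBubble: A's while-loop on the extracted subgroup ----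

/-- proof-only model of A's inner while loop, acting on the extracted subgroup list. -/
def pvBubble (l : List Int) (t : Nat) : List Int :=
  if _h : 0 < t ∧ l.getD t 0 < l.getD (t - 1) 0 then pvBubble (pvSwap l t (t - 1)) (t - 1) else l
  termination_by t
  decreasing_by omega

-- ---- A-side simulation ----

theorem length_aWhile (g i : Nat) (xs : List Int) (k : Nat) :
    (aWhile g i xs k).length = xs.length := by
  induction xs, k using aWhile.induct g i with
  | case1 xs k h ih => rw [aWhile, dif_pos h, ih, length_pvSwap]
  | case2 xs k h => rw [aWhile, dif_neg h]

theorem aWhile_sub (g i : Nat) (hg : 0 < g) :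
    ∀ (t : Nat) (xs : List Int), i + t * g < xs.length →
      pvSub g (aWhile g i xs (i + t * g)) i = pvBubble (pvSub g xs i) t := by
  intro t
  induction t with
  | zero =>
    intro xs _
    rw [aWhile, dif_neg (by omega), pvBubble, dif_neg (by omega)]
  | succ s ih =>
    intro xs ht
    have hks : i + (s + 1) * g - g = i + s * g := by rw [Nat.succ_mul]; omega
    have hslt : i + s * g < xs.length := by rw [Nat.succ_mul] at ht; omega
    have hvt : xs.getD (i + (s + 1) * g) 0 = (pvSub g xs i).getD (s + 1) 0 :=
      (pvSub_getD g xs i (s + 1) hg).symm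
    have hvs : xs.getD (i + s * g) 0 = (pvSub g xs i).getD s 0 :=
      (pvSub_getD g xs i s hg).symm
    by_cases hlt : xs.getD (i + (s + 1) * g) 0 < xs.getD (i + s * g) 0
    · have hpos : i < i + (s + 1) * g := by
        have h0 : 0 < (s + 1) * g := Nat.mul_pos (by omega) hg; omega
      rw [aWhile, dif_pos ⟨hg, hpos, by rw [hks]; exact hlt⟩, hks]
      rw [pvBubble, dif_pos ⟨by omega, by
        simp only [Nat.add_sub_cancel]
        rw [← hvt, ← hvs]; exact hlt⟩]
      simp only [Nat.add_sub_cancel]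
      have hsw : pvSub g (pvSwap xs (i + (s + 1) * g) (i + s * g)) i
          = pvSwap (pvSub g xs i) (s + 1) s := by
        unfold pvSwap
        rw [pvSub_set g (xs.set (i + (s + 1) * g) (xs.getD (i + s * g) 0)) i s
              (xs.getD (i + (s + 1) * g) 0) hg (by simpa using hslt),
            pvSub_set g xs i (s + 1) (xs.getD (i + s * g) 0) hg ht, hvt, hvs]
      rw [← hsw]
      exact ih (pvSwap xs (i + (s + 1) * g) (i + s * g)) (by rw [length_pvSwap]; exact hslt)
    · rw [aWhile, dif_neg (by rw [hks]; intro hc; exact hlt hc.2.2)]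
      rw [pvBubble, dif_neg (by
        intro hc
        apply hlt
        rw [hvt, hvs]
        simpa using hc.2)]

-- ---- pvBubble correctness: it inserts element t into the sorted prefix ----

theorem length_pvBubble (l : List Int) (t : Nat) : (pvBubble l t).length = l.length := by
  induction l, t using pvBubble.induct with
  | case1 l t h ih => rw [pvBubble, dif_pos h, ih, length_pvSwap]
  | case2 l t h => rw [pvBubble, dif_neg h]

theorem pvBubble_props : ∀ (t : Nat) (l : List Int), t < l.length → (l.take t).Pairwise (· ≤ ·) →
    (pvBubble l t).Perm l ∧ ((pvBubble l t).take (t + 1)).Pairwise (· ≤ ·) ∧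
      (pvBubble l t).drop (t + 1) = l.drop (t + 1) := by
  intro t
  induction t with
  | zero =>
    intro l hl _
    rw [pvBubble, dif_neg (by omega)]
    refine ⟨List.Perm.refl _, ?_, rfl⟩
    rw [List.pairwise_iff_getElem]
    intro a b h1 h2 hab
    simp at h1 h2
    omega
  | succ s ih =>
    intro l ht hsort
    have hsl : s < l.length := by omega
    have hgt : l.getD (s + 1) 0 = l[s + 1] := List.getD_eq_getElem _ _ ht
    have hgs : l.getD s 0 = l[s] := List.getD_eq_getElem _ _ hsl
    have hsortE : ∀ (a b : Nat) (ha : a < l.length) (hb : b < l.length),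
        a < b → b ≤ s → l[a] ≤ l[b] := by
      intro a b ha hb hab hbs
      have := (List.pairwise_iff_getElem.1 hsort) a b (by simp; omega) (by simp; omega) hab
      simpa [List.getElem_take] using this
    by_cases hlt : l.getD (s + 1) 0 < l.getD s 0
    · rw [pvBubble, dif_pos ⟨by omega, by simpa using hlt⟩]
      simp only [Nat.add_sub_cancel]
      have hlen' : (pvSwap l (s + 1) s).length = l.length := length_pvSwap l (s + 1) s
      have hsort' : ((pvSwap l (s + 1) s).take s).Pairwise (· ≤ ·) := by
        rw [List.pairwise_iff_getElem] at hsort ⊢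
        intro a b h1 h2 hab
        simp only [List.length_take, hlen'] at h1 h2
        have ha : a < l.length := by omega
        have hb : b < l.length := by omega
        rw [List.getElem_take, List.getElem_take,
            pvSwap_getElem l (s + 1) s a ht hsl ha,
            pvSwap_getElem l (s + 1) s b ht hsl hb,
            if_neg (by omega), if_neg (by omega), if_neg (by omega), if_neg (by omega)]
        exact hsortE a b ha hb hab (by omega)
      obtain ⟨ihp, ihsort, ihdrop⟩ := ih (pvSwap l (s + 1) s) (by omega) hsort'
      have hrlen : (pvBubble (pvSwap l (s + 1) s) s).length = l.length := by
        rw [length_pvBubble, hlen']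
      set r := pvBubble (pvSwap l (s + 1) s) s with hr
      have hperm : r.Perm l := ihp.trans (perm_pvSwap l (s + 1) s ht hsl)
      have hrs1 : ∀ (h : s + 1 < r.length), r[s + 1] = l[s] := by
        intro h
        have h0 : (0 : Nat) < (r.drop (s + 1)).length := by
          rw [List.length_drop]; omega
        have h0' : (0 : Nat) < ((pvSwap l (s + 1) s).drop (s + 1)).length := by
          rw [List.length_drop, hlen']; omega
        have e1 : (r.drop (s + 1))[0] = ((pvSwap l (s + 1) s).drop (s + 1))[0]'h0' := by
          simp only [ihdrop]
        rw [List.getElem_drop, List.getElem_drop] at e1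
        simp only [Nat.add_zero] at e1
        rw [e1, pvSwap_getElem l (s + 1) s (s + 1) ht hsl ht, if_neg (by omega), if_pos rfl]
      have hptake : (r.take (s + 1)).Perm ((pvSwap l (s + 1) s).take (s + 1)) := by
        have h3 : r.take (s + 1) ++ r.drop (s + 1)
            = r := List.take_append_drop _ _
        have h4 : (pvSwap l (s + 1) s).take (s + 1) ++ (pvSwap l (s + 1) s).drop (s + 1)
            = pvSwap l (s + 1) s := List.take_append_drop _ _
        have h5 : (r.take (s + 1) ++ r.drop (s + 1)).Perm
            ((pvSwap l (s + 1) s).take (s + 1) ++ (pvSwap l (s + 1) s).drop (s + 1)) := by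
          rw [h3, h4]; exact ihp
        rw [ihdrop] at h5
        exact (List.perm_append_right_iff _).1 h5
      have hmem : ∀ x ∈ r.take (s + 1), x ≤ l[s] := by
        intro x hx
        have hx' : x ∈ (pvSwap l (s + 1) s).take (s + 1) := hptake.mem_iff.1 hx
        obtain ⟨c, hc, rfl⟩ := List.getElem_of_mem hx'
        have hc' : c < s + 1 := by
          have := hc; simp only [List.length_take, hlen'] at this; omega
        have hcl : c < l.length := by omega
        rw [List.getElem_take, pvSwap_getElem l (s + 1) s c ht hsl hcl]
        by_cases hcs : c = s
        · rw [if_pos hcs]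
          rw [hgt, hgs] at hlt
          omega
        · rw [if_neg hcs, if_neg (by omega)]
          exact hsortE c s hcl hsl (by omega) (by omega)
      refine ⟨hperm, ?_, ?_⟩
      · rw [List.pairwise_iff_getElem]
        intro a b h1 h2 hab
        simp only [List.length_take, hrlen] at h1 h2
        have hbr : b < r.length := by omega
        have har : a < r.length := by omega
        rw [List.getElem_take, List.getElem_take]
        by_cases hbs : b = s + 1
        · subst hbs
          rw [hrs1 hbr]
          have : r[a] ∈ r.take (s + 1) := by
            have haT : a < (r.take (s + 1)).length := by simp; omega
            have : (r.take (s + 1))[a] = r[a] := List.getElem_take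
            rw [← this]
            exact List.getElem_mem haT
          exact hmem _ this
        · have := (List.pairwise_iff_getElem.1 ihsort) a b (by simp; omega) (by simp; omega) hab
          simpa [List.getElem_take] using this
      · have h7 : (pvSwap l (s + 1) s).drop (s + 1 + 1) = l.drop (s + 1 + 1) := by
          simp only [pvSwap, List.drop_set]
          rw [if_pos (by omega), if_pos (by omega)]
        have hA : r.drop (s + 1 + 1) = (r.drop (s + 1)).drop 1 := by rw [List.drop_drop]
        have hB : (pvSwap l (s + 1) s).drop (s + 1 + 1)
            = ((pvSwap l (s + 1) s).drop (s + 1)).drop 1 := by rw [List.drop_drop]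
        rw [hA, ihdrop, ← hB, h7]
    · rw [pvBubble, dif_neg (by simp only [Nat.add_sub_cancel]; intro hc; exact hlt hc.2)]
      refine ⟨List.Perm.refl _, ?_, rfl⟩
      rw [List.pairwise_iff_getElem]
      intro a b h1 h2 hab
      simp only [List.length_take] at h1 h2
      have hbl : b < l.length := by omega
      have hal : a < l.length := by omega
      rw [List.getElem_take, List.getElem_take]
      by_cases hbs : b = s + 1
      · subst hbs
        have h6 : l[s] ≤ l[s + 1] := by rw [← hgt, ← hgs]; omega
        by_cases has : a = s
        · subst has; exact h6
        · exact le_trans (hsortE a s hal hsl (by omega) (by omega)) h6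
      · exact hsortE a b hal hbl hab (by omega)

theorem insFold_props : ∀ (c : Nat) (l : List Int), c ≤ l.length →
    ((List.range c).foldl pvBubble l).Perm l ∧
      (((List.range c).foldl pvBubble l).take c).Pairwise (· ≤ ·) := by
  intro c
  induction c with
  | zero => intro l _; simp
  | succ c ih =>
    intro l hc
    obtain ⟨p, s⟩ := ih l (by omega)
    rw [List.range_succ, List.foldl_append, List.foldl_cons, List.foldl_nil]
    have hrl : ((List.range c).foldl pvBubble l).length = l.length := p.length_eq
    obtain ⟨p2, s2, _⟩ := pvBubble_props c ((List.range c).foldl pvBubble l) (by omega) s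
    exact ⟨p2.trans p, s2⟩

theorem sorted_eq_insFold (l : List Int) :
    PySem.List.sorted l (fun x => x) false = (List.range l.length).foldl pvBubble l := by
  obtain ⟨p, s⟩ := insFold_props l.length l (le_refl _)
  apply PySem.List.sorted_id_eq_of_perm_of_pairwise l _ p
  rw [List.take_of_length_le (le_of_eq p.length_eq)] at s
  exact s

-- ---- A-side pass lemmas ----

theorem length_aPassFold (g i : Nat) :
    ∀ (ts : List Nat) (xs : List Int),
      (ts.foldl (fun ys j => aWhile g i ys j) xs).length = xs.length := by
  intro ts
  induction ts with
  | nil => intro xs; rfl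
  | cons t ts ih => intro xs; rw [List.foldl_cons, ih, length_aWhile]

theorem length_aPass (g n : Nat) (xs : List Int) (i : Nat) :
    (aPass g n xs i).length = xs.length := length_aPassFold g i (pvStride i n g) xs

theorem aPass_sub (g i n : Nat) (hg : 0 < g) (xs : List Int) (hn : xs.length = n) :
    pvSub g (aPass g n xs i) i
      = (List.range (pvStride i n g).length).foldl pvBubble (pvSub g xs i) := by
  have H : ∀ (ts : List Nat) (xs : List Int), xs.length = n → (∀ t ∈ ts, i + t * g < n) →
      pvSub g (ts.foldl (fun ys t => aWhile g i ys (i + t * g)) xs) i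
        = ts.foldl pvBubble (pvSub g xs i) := by
    intro ts
    induction ts with
    | nil => intro xs _ _; rfl
    | cons t ts ih =>
      intro xs hxn hmem
      rw [List.foldl_cons, List.foldl_cons,
          ih (aWhile g i xs (i + t * g)) (by rw [length_aWhile]; exact hxn)
            (fun u hu => hmem u (List.mem_cons_of_mem _ hu)),
          aWhile_sub g i hg t xs (by rw [hxn]; exact hmem t List.mem_cons_self)]
  unfold aPass
  rw [pvStride_eq_map g n i hg, List.foldl_map]
  simp only [List.length_map, List.length_range]
  exact H (List.range (pvStride i n g).length) xs hn (fun t htm => by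
    rw [← pvStride_length_iff g n i t hg]
    exact List.mem_range.1 htm)

theorem aWhile_getD_off (g i p : Nat) (hg : 0 < g) (hp : ∀ u : Nat, p ≠ i + u * g) :
    ∀ (t : Nat) (xs : List Int), (aWhile g i xs (i + t * g)).getD p 0 = xs.getD p 0 := by
  intro t
  induction t with
  | zero => intro xs; rw [aWhile, dif_neg (by omega)]
  | succ s ih =>
    intro xs
    have hks : i + (s + 1) * g - g = i + s * g := by rw [Nat.succ_mul]; omega
    by_cases hc : 0 < g ∧ i < i + (s + 1) * g ∧
        xs.getD (i + (s + 1) * g) 0 < xs.getD (i + (s + 1) * g - g) 0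
    · rw [aWhile, dif_pos hc, hks, ih, pvSwap,
          pv_getD_set_ne _ _ _ _ (fun hc2 => hp s (by omega)),
          pv_getD_set_ne _ _ _ _ (fun hc2 => hp (s + 1) (by omega))]
    · rw [aWhile, dif_neg hc]

theorem aPass_getD_off (g n i p : Nat) (hg : 0 < g) (hp : ∀ u : Nat, p ≠ i + u * g)
    (xs : List Int) : (aPass g n xs i).getD p 0 = xs.getD p 0 := by
  have H : ∀ (ts : List Nat) (xs : List Int),
      (ts.foldl (fun ys t => aWhile g i ys (i + t * g)) xs).getD p 0 = xs.getD p 0 := by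
    intro ts
    induction ts with
    | nil => intro xs; rfl
    | cons t ts ih => intro xs; rw [List.foldl_cons, ih, aWhile_getD_off g i p hg hp]
  unfold aPass
  rw [pvStride_eq_map g n i hg, List.foldl_map]
  exact H _ xs

-- ---- B-side pass lemmas ----

theorem length_pvScatter : ∀ (vs xs : List Int) (i g : Nat),
    (pvScatter xs i g vs).length = xs.length := by
  intro vs
  induction vs with
  | nil => intro xs i g; rfl
  | cons v vs ih => intro xs i g; rw [pvScatter, ih, List.length_set]

theorem pvScatter_getD_lt : ∀ (vs xs : List Int) (i g p : Nat), p < i →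
    (pvScatter xs i g vs).getD p 0 = xs.getD p 0 := by
  intro vs
  induction vs with
  | nil => intro xs i g p _; rfl
  | cons v vs ih =>
    intro xs i g p hp
    rw [pvScatter, ih _ _ _ _ (by omega), pv_getD_set_ne _ _ _ _ (by omega)]

theorem pvScatter_getD_off (g p : Nat) : ∀ (vs xs : List Int) (i : Nat),
    (∀ u : Nat, p ≠ i + u * g) → (pvScatter xs i g vs).getD p 0 = xs.getD p 0 := by
  intro vs
  induction vs with
  | nil => intro xs i _; rfl
  | cons v vs ih =>
    intro xs i hp
    rw [pvScatter, ih _ _ (fun u hc => hp (u + 1) (by rw [Nat.succ_mul]; omega)),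
        pv_getD_set_ne _ _ _ _ (fun hc => hp 0 (by omega))]

theorem pvSub_pvScatter (g : Nat) (hg : 0 < g) : ∀ (vs xs : List Int) (i : Nat),
    vs.length = (pvSub g xs i).length → pvSub g (pvScatter xs i g vs) i = vs := by
  intro vs
  induction vs with
  | nil =>
    intro xs i hlen
    have h0 : (pvSub g xs i).length = 0 := by simpa using hlen.symm
    simpa [pvScatter] using List.eq_nil_of_length_eq_zero h0
  | cons v vs ih =>
    intro xs i hlen
    have hi : i < xs.length := by
      by_contra hi
      rw [pvSub_nil g xs i (fun hc => hi hc.2)] at hlen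
      simp at hlen
    rw [pvScatter]
    have hlen2 : vs.length = (pvSub g (xs.set i v) (i + g)).length := by
      rw [pvSub_cons g xs i hg hi] at hlen
      simp only [List.length_cons] at hlen
      rw [length_pvSub, List.length_set, ← length_pvSub g xs (i + g)]
      omega
    rw [pvSub_cons g (pvScatter (xs.set i v) (i + g) g vs) i hg
          (by rw [length_pvScatter, List.length_set]; exact hi),
        pvScatter_getD_lt _ _ _ _ _ (by omega), pv_getD_set_self _ _ _ hi,
        ih (xs.set i v) (i + g) hlen2]

-- ---- the two passes are equal ----

theorem pass_eq (g : Nat) (hg : 0 < g) (xs : List Int) (i : Nat) :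
    aPass g xs.length xs i
      = pvScatter xs i g (PySem.List.sorted (pvSub g xs i) (fun x => x) false) := by
  have hLlen : (aPass g xs.length xs i).length = xs.length := length_aPass g xs.length xs i
  have hRlen : (pvScatter xs i g (PySem.List.sorted (pvSub g xs i) (fun x => x) false)).length
      = xs.length := length_pvScatter _ xs i g
  have hsubL := aPass_sub g i xs.length hg xs rfl
  have hsubR := pvSub_pvScatter g hg (PySem.List.sorted (pvSub g xs i) (fun x => x) false) xs i
    (by rw [PySem.List.length_sorted])
  have hsubeq : pvSub g (aPass g xs.length xs i) i
      = pvSub g (pvScatter xs i g (PySem.List.sorted (pvSub g xs i) (fun x => x) false)) i := by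
    rw [hsubL, hsubR, sorted_eq_insFold, length_pvSub]
  apply List.ext_getElem (by rw [hLlen, hRlen])
  intro p h1 h2
  by_cases hsub : ∃ t : Nat, p = i + t * g
  · obtain ⟨t, rfl⟩ := hsub
    rw [← List.getD_eq_getElem _ 0 h1, ← List.getD_eq_getElem _ 0 h2,
        ← pvSub_getD g _ i t hg, ← pvSub_getD g _ i t hg, hsubeq]
  · push_neg at hsub
    rw [← List.getD_eq_getElem _ 0 h1, ← List.getD_eq_getElem _ 0 h2,
        aPass_getD_off g xs.length i p hg hsub xs,
        pvScatter_getD_off g p _ xs i hsub]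

theorem fold_eq (g n : Nat) (hg : 0 < g) :
    ∀ (is : List Nat) (xs : List Int), xs.length = n →
      is.foldl (aPass g n) xs
        = is.foldl (fun xs i =>
            pvScatter xs i g (PySem.List.sorted (pvSub g xs i) (fun x => x) false)) xs := by
  intro is
  induction is with
  | nil => intro xs _; rfl
  | cons i is ih =>
    intro xs hn
    rw [List.foldl_cons, List.foldl_cons]
    have h1 := pass_eq g hg xs i
    rw [hn] at h1
    rw [h1, ih _ (by rw [length_pvScatter]; exact hn)]

-- ===== VERDICT (by name: the statement is the Claim_ definition above) =====
theorem shell_sub_sort_spec : Claim_equal_shell_sub_sort := by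
  intro nums gap _
  unfold Spec_shell_sub_sort shell_sub_sort shell_sub_sort_alt
  rcases Nat.eq_zero_or_pos gap.toNat with h | h
  · rw [h]; rfl
  · exact fold_eq gap.toNat nums.length h (List.range gap.toNat) nums rfl
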